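-- pv_equiv track=rewrite | github.com/MANY-35/OneQuestionADay | 2023_04_06/12973/solution.py | solution
-- ===== SOURCE A (Python) =====
-- def solution(s):
--     stack = ['']
--
--     for i in s:
--         a = stack.pop()
--         if a == i:
--             continue
--         stack.append(a)
--         stack.append(i)
--
--     if len(stack) > 1:
--         return 0
--     return 1
-- ===== SOURCE B (Python) =====
-- def solution(s):
--     cur = s
--     while True:
--         out = []
--         changed = False
--         i = 0
--         while i < len(cur):
--             if i + 1 < len(cur) and cur[i] == cur[i + 1]:
--                 changed = True
--                 i += 2
--             else:
--                 out.append(cur[i])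
--                 i += 1
--         cur = ''.join(out)
--         if not changed:
--             break
--     return 1 if cur == '' else 0
-- ===== Notes on version B (the rewrite author's own statement) =====
-- stated objective: alternative
-- what changed: Replaces the single sentinel-stack pass with a repeat-until-stable outer loop, each sweep deleting adjacent equal pairs while walking the string with a lookahead index; no stack is kept.
import Mathlib
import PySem

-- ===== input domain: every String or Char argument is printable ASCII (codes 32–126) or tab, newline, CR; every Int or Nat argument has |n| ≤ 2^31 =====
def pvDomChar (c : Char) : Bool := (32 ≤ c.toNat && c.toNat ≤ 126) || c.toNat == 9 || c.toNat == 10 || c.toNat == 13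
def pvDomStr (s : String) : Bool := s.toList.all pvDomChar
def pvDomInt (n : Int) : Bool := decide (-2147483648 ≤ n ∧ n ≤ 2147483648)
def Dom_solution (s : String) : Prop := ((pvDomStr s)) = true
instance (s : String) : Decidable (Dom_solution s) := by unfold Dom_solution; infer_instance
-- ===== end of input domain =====

-- B replaces A's single sentinel-stack pass by a repeat-until-stable sweep that deletes
-- adjacent equal pairs; objective: alternative decomposition (no speed claim).

-- ===== PORT A =====
-- A's stack (Python list, top at the end) is represented top-at-head; the sentinel "" stays at
-- the bottom, so the pop in the [] branch is unreachable.
def aStep (st : List String) (c : Char) : List String :=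
  match st with
  | a :: rest => if a = String.singleton c then rest else String.singleton c :: a :: rest
  | [] => []  -- unreachable: the stack always carries the "" sentinel at the bottom

def solution (s : String) : Int :=
  let st := s.toList.foldl aStep [""]
  if st.length > 1 then 0 else 1

-- ===== PORT B =====
-- one inner sweep of Source B: walk with a lookahead, dropping both of an adjacent equal pair;
-- returns the surviving characters and the `changed` flag
def sweepPass : List Char → List Char × Bool
  | a :: b :: t =>
      if a = b then ((sweepPass t).1, true)
      else ((a :: (sweepPass (b :: t)).1), (sweepPass (b :: t)).2)
  | l => (l, false)
termination_by l => l.length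

theorem sweepPass_len_le (l : List Char) : (sweepPass l).1.length ≤ l.length := by
  fun_induction sweepPass l with
  | case1 b t ih => simp; omega
  | case2 a b t h ih => simp at ih ⊢; omega
  | case3 l _ => exact le_rfl

theorem sweepPass_true_lt (l : List Char) (h : (sweepPass l).2 = true) :
    (sweepPass l).1.length < l.length := by
  fun_induction sweepPass l with
  | case1 b t ih =>
      have := sweepPass_len_le t
      simp; omega
  | case2 a b t hab ih =>
      simp at h ⊢
      have := ih h
      simp at this ⊢; omega
  | case3 l hl =>
      rcases l with _ | ⟨a, _ | ⟨b, t⟩⟩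
      · simp at h
      · simp at h
      · exact absurd rfl (hl a b t)

-- Source B's outer `while True` loop: sweep until a sweep removes nothing
def sweepLoop (l : List Char) : List Char :=
  if hgo : (sweepPass l).2 = true then sweepLoop (sweepPass l).1 else l
termination_by l.length
decreasing_by exact sweepPass_true_lt _ hgo

def solution_alt (s : String) : Int :=
  if sweepLoop s.toList = [] then 1 else 0

-- ===== PRECONDITION & SPEC =====
def Spec_solution (s : String) (out : Int) : Prop := out = solution_alt s
instance (s : String) (out : Int) : Decidable (Spec_solution s out) := by unfold Spec_solution; infer_instance

-- ===== CLAIM (what is proved, stated in full; the proofs are below) =====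
def Claim_equal_solution : Prop := ∀ (s : String), Dom_solution s → Spec_solution s (solution s)

-- ===== LEMMAS AND PROOFS =====

-- reference reduction: A's stack over chars, top at head, no sentinel
def rstep (st : List Char) (c : Char) : List Char :=
  match st with
  | a :: r => if a = c then r else c :: a :: r
  | [] => [c]

-- the stack invariant: no two adjacent equal entries
theorem rstep_chain {st : List Char} (h : List.IsChain (· ≠ ·) st) (c : Char) :
    List.IsChain (· ≠ ·) (rstep st c) := by
  rcases st with _ | ⟨a, r⟩
  · simp [rstep]
  · by_cases hac : a = c
    · simp only [rstep, if_pos hac]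
      exact (List.isChain_cons.mp h).2
    · simp only [rstep, if_neg hac]
      exact List.isChain_cons_cons.mpr ⟨fun hh => hac hh.symm, h⟩

theorem rstep_rstep {st : List Char} (h : List.IsChain (· ≠ ·) st) (c : Char) :
    rstep (rstep st c) c = st := by
  rcases st with _ | ⟨a, r⟩
  · simp [rstep]
  · by_cases hac : a = c
    · subst hac
      rcases r with _ | ⟨b, r'⟩
      · simp [rstep]
      · have hba : a ≠ b := (List.isChain_cons_cons.mp h).1
        have hba' : ¬ (b = a) := fun hh => hba hh.symm
        simp [rstep, hba']
    · simp [rstep, hac]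

theorem singleton_inj {a b : Char} (h : String.singleton a = String.singleton b) : a = b := by
  have := congrArg String.toList h
  simpa [String.singleton] using this

theorem singleton_ne_empty (c : Char) : String.singleton c ≠ "" := by
  intro h
  have := congrArg String.toList h
  simp [String.singleton] at this

-- A's stack is the char reduction mapped to singletons, over the sentinel
theorem aStep_map (st : List Char) (c : Char) :
    aStep (st.map String.singleton ++ [""]) c = (rstep st c).map String.singleton ++ [""] := by
  rcases st with _ | ⟨a, r⟩
  · simp [aStep, rstep, (singleton_ne_empty c).symm]
  · by_cases h : a = c
    · simp [aStep, rstep, h]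
    · have : String.singleton a ≠ String.singleton c := fun hh => h (singleton_inj hh)
      simp [aStep, rstep, h, this]

theorem foldA (l : List Char) : ∀ st : List Char,
    l.foldl aStep (st.map String.singleton ++ [""]) = (l.foldl rstep st).map String.singleton ++ [""] := by
  induction l with
  | nil => intro st; rfl
  | cons c t ih => intro st; simp only [List.foldl_cons, aStep_map]; exact ih _

-- one sweep does not change the stack reduction (over any valid stack)
theorem foldl_sweepPass (l : List Char) : ∀ st : List Char, List.IsChain (· ≠ ·) st →
    (sweepPass l).1.foldl rstep st = l.foldl rstep st := by
  fun_induction sweepPass l with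
  | case1 b t ih =>
      intro st hst
      simp only [sweepPass, List.foldl_cons, ih st hst, rstep_rstep hst]
  | case2 a b t h ih =>
      intro st hst
      simp only [sweepPass, if_neg h, List.foldl_cons]
      exact ih (rstep st a) (rstep_chain hst a)
  | case3 l _ => intro st _; rfl

-- a sweep that removes nothing certifies no adjacent equal pair
theorem sweepPass_false_chain (l : List Char) (h : (sweepPass l).2 = false) :
    List.IsChain (· ≠ ·) l := by
  fun_induction sweepPass l with
  | case1 b t ih => simp at h
  | case2 a b t hab ih =>
      simp at h
      exact List.isChain_cons_cons.mpr ⟨hab, ih h⟩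
  | case3 l hl =>
      rcases l with _ | ⟨a, _ | ⟨b, t⟩⟩
      · simp
      · simp
      · exact absurd rfl (hl a b t)

theorem sweepLoop_red (l : List Char) :
    (sweepLoop l).foldl rstep [] = l.foldl rstep [] := by
  fun_induction sweepLoop l with
  | case1 l h ih => rw [ih, foldl_sweepPass _ [] (by simp)]
  | case2 l h => rfl

theorem sweepLoop_chain (l : List Char) : List.IsChain (· ≠ ·) (sweepLoop l) := by
  fun_induction sweepLoop l with
  | case1 l h ih => exact ih
  | case2 l h => exact sweepPass_false_chain l (by simpa using h)

-- on an adjacent-distinct list the reduction just reverses onto the stack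
theorem foldl_rstep_chain (l : List Char) : ∀ st : List Char,
    List.IsChain (· ≠ ·) l →
    (∀ c c', l.head? = some c → st.head? = some c' → c ≠ c') →
    l.foldl rstep st = l.reverse ++ st := by
  induction l with
  | nil => intro st _ _; simp
  | cons c t ih =>
      intro st hch hhd
      have hstep : rstep st c = c :: st := by
        rcases st with _ | ⟨a, r⟩
        · rfl
        · have hca : c ≠ a := hhd c a rfl rfl
          simp only [rstep]
          rw [if_neg (fun hh : a = c => hca hh.symm)]
      simp only [List.foldl_cons, hstep]
      rw [ih (c :: st) (List.isChain_cons.mp hch).2]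
      · simp
      · intro d d' hd hd'
        simp at hd'
        subst hd'
        rcases t with _ | ⟨b, t'⟩
        · simp at hd
        · simp at hd; subst hd
          exact fun hh => (List.isChain_cons_cons.mp hch).1 hh.symm

theorem sweepLoop_empty_iff (l : List Char) :
    sweepLoop l = [] ↔ l.foldl rstep [] = [] := by
  constructor
  · intro h
    have := sweepLoop_red l
    rw [h] at this
    simpa using this.symm
  · intro h
    have h1 : (sweepLoop l).foldl rstep [] = [] := by rw [sweepLoop_red l]; exact h
    have h2 := foldl_rstep_chain (sweepLoop l) [] (sweepLoop_chain l)
      (by intro c c' _ hc'; simp at hc')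
    rw [h2] at h1
    simpa using h1

-- ===== VERDICT (by name: the statement is the Claim_ definition above) =====
theorem solution_spec : Claim_equal_solution := by
  intro s _
  unfold Spec_solution solution solution_alt
  have hA : s.toList.foldl aStep [""] =
      (s.toList.foldl rstep []).map String.singleton ++ [""] := by
    simpa using foldA s.toList []
  rw [hA]
  by_cases h : s.toList.foldl rstep [] = []
  · rw [if_neg, if_pos ((sweepLoop_empty_iff s.toList).mpr h)]
    simp [h]
  · rw [if_pos, if_neg (fun hh => h ((sweepLoop_empty_iff s.toList).mp hh))]
    simp
    rcases List.exists_cons_of_ne_nil h with ⟨a, t, ht⟩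
    simp [ht]
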